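-- pv_equiv track=rewrite | github.com/nchikkam/projects | py/ftchr/pwd.py | match_pwd_criteria
-- ===== SOURCE A (Python) =====
-- def match_pwd_criteria(pwd):
--     digits = ['0', '1', '2', '3', '4', '5', '6', '7', '8', '9']
--     upper_chars = [
--         'A', 'B', 'C', 'D', 'E', 'F', 'G', 'H', 'I', 'J',
--         'K', 'L', 'M', 'N', 'O', 'P', 'Q', 'R', 'S', 'T',
--         'U', 'V', 'W', 'X', 'Y', 'Z']
--     uppers_char_flag = False
--
--     for digit in digits:
--         if digit in pwd:
--             return False
--
--     for char in upper_chars: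
--         if char in pwd:
--             uppers_char_flag = True
--             break
--
--     return uppers_char_flag
-- ===== SOURCE B (Python) =====
-- def match_pwd_criteria(pwd):
--     found_upper = False
--     for ch in pwd:
--         if ch in '0123456789':
--             return False
--         if ch in 'ABCDEFGHIJKLMNOPQRSTUVWXYZ':
--             found_upper = True
--     return found_upper
-- ===== Notes on version B (the rewrite author's own statement) =====
-- stated objective: alternative
-- what changed: B scans the password once with an early return on a digit and an uppercase flag, instead of A's one membership scan of pwd per digit and per uppercase letter; fewer character comparisons, though A's per-needle scans run in C so wall-clock speed is not claimed.
import Mathlib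
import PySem

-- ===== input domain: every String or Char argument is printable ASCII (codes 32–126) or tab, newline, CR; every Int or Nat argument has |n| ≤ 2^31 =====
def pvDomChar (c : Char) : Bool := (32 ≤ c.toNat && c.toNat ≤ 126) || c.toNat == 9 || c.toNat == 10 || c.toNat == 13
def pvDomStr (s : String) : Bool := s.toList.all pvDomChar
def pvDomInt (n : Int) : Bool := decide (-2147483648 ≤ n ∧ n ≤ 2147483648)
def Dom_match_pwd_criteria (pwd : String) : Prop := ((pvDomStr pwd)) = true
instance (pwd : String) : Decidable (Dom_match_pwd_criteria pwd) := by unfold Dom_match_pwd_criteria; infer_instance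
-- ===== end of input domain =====

-- B replaces A's per-digit/per-letter scans of pwd with a single pass over pwd (early return on a digit, flag for uppercase).


-- ===== PORT A =====
def pvDigits : List Char := ['0','1','2','3','4','5','6','7','8','9']
def pvUppers : List Char :=
  ['A','B','C','D','E','F','G','H','I','J','K','L','M','N','O','P','Q','R','S','T','U','V','W','X','Y','Z']

-- 'digit in pwd' for a one-character needle is exactly character membership in the string
def pvA_digitLoop (pwd : List Char) : List Char → Option Bool
  | [] => none
  | d :: rest => if pwd.contains d then some false else pvA_digitLoop pwd rest

def pvA_upperLoop (pwd : List Char) : List Char → Bool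
  | [] => false
  | c :: rest => if pwd.contains c then true else pvA_upperLoop pwd rest

def match_pwd_criteria (pwd : String) : Bool :=
  match pvA_digitLoop pwd.toList pvDigits with
  | some b => b
  | none => pvA_upperLoop pwd.toList pvUppers

-- ===== PORT B =====
def pvB_scan : List Char → Bool → Bool
  | [], flag => flag
  | c :: rest, flag =>
    if pvDigits.contains c then false
    else pvB_scan rest (flag || pvUppers.contains c)

def match_pwd_criteria_alt (pwd : String) : Bool := pvB_scan pwd.toList false

-- ===== PRECONDITION & SPEC =====
def Spec_match_pwd_criteria (pwd : String) (out : Bool) : Prop := out = match_pwd_criteria_alt pwd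
instance (pwd : String) (out : Bool) : Decidable (Spec_match_pwd_criteria pwd out) := by unfold Spec_match_pwd_criteria; infer_instance

-- ===== CLAIM (what is proved, stated in full; the proofs are below) =====
def Claim_equal_match_pwd_criteria : Prop := ∀ (pwd : String), Dom_match_pwd_criteria pwd → Spec_match_pwd_criteria pwd (match_pwd_criteria pwd)

-- ===== LEMMAS AND PROOFS =====
theorem pvA_digitLoop_eq (l ds : List Char) :
    pvA_digitLoop l ds = if ds.any l.contains then some false else none := by
  induction ds with
  | nil => simp [pvA_digitLoop]
  | cons d rest ih =>
    cases h : l.contains d with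
    | true => simp only [pvA_digitLoop, List.any_cons, h, Bool.true_or, if_true]
    | false => simp only [pvA_digitLoop, List.any_cons, h, ih]; simp

theorem pvA_upperLoop_eq (l cs : List Char) :
    pvA_upperLoop l cs = cs.any l.contains := by
  induction cs with
  | nil => simp [pvA_upperLoop]
  | cons c rest ih =>
    cases h : l.contains c with
    | true => simp only [pvA_upperLoop, List.any_cons, h, Bool.true_or, if_true]
    | false => simp only [pvA_upperLoop, List.any_cons, h, ih]; simp

theorem any_contains_comm (xs ys : List Char) :
    xs.any ys.contains = ys.any (fun c => xs.contains c) := by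
  rw [Bool.eq_iff_iff]
  simp only [List.any_eq_true, List.contains_iff_mem]
  constructor
  · rintro ⟨a, ha, hb⟩; exact ⟨a, hb, ha⟩
  · rintro ⟨a, ha, hb⟩; exact ⟨a, hb, ha⟩

theorem pvB_scan_eq (l : List Char) (flag : Bool) :
    pvB_scan l flag =
      if l.any (fun c => pvDigits.contains c) then false
      else flag || l.any (fun c => pvUppers.contains c) := by
  induction l generalizing flag with
  | nil => simp [pvB_scan]
  | cons c rest ih =>
    cases h : pvDigits.contains c with
    | true => simp only [pvB_scan, List.any_cons, h, Bool.true_or, if_true]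
    | false =>
      simp only [pvB_scan, List.any_cons, h, ih]
      cases h2 : rest.any (fun c => pvDigits.contains c) with
      | true => simp
      | false => simp [Bool.or_assoc]

-- ===== VERDICT (by name: the statement is the Claim_ definition above) =====
theorem match_pwd_criteria_spec : Claim_equal_match_pwd_criteria := by
  intro pwd _
  unfold Spec_match_pwd_criteria match_pwd_criteria match_pwd_criteria_alt
  rw [pvA_digitLoop_eq, pvA_upperLoop_eq, pvB_scan_eq,
      any_contains_comm pvDigits pwd.toList, any_contains_comm pvUppers pwd.toList]
  cases h : pwd.toList.any (fun c => pvDigits.contains c) with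
  | true => simp
  | false => simp
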